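-- pv_equiv track=rewrite | github.com/Usefullatwork/Cot-ExplorerV2 | tests/unit/test_optimizer.py | _monthly_dates
-- ===== SOURCE A (Python) =====
-- def _monthly_dates(months: int, start_year: int = 2020, start_month: int = 1) -> list[str]:
--     """Generate one date per month for the given number of months."""
--     dates: list[str] = []
--     y, m = start_year, start_month
--     for _ in range(months):
--         dates.append(f"{y}-{m:02d}-15")
--         m += 1
--         if m > 12:
--             m = 1
--             y += 1
--     return dates
-- ===== SOURCE B (Python) =====
-- def _monthly_dates(months: int, start_year: int = 2020, start_month: int = 1) -> list[str]:
--     """Generate one date per month for the given number of months."""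
--     first = start_year * 12 + start_month - 1
--     dates: list[str] = []
--     for i in range(months):
--         y, m = divmod(first + i, 12)
--         dates.append(f"{y}-{m + 1:02d}-15")
--     return dates
-- ===== Notes on version B (the rewrite author's own statement) =====
-- stated objective: simpler
-- what changed: The stateful carry loop over a mutating (year, month) pair is replaced by a single pass that computes each date independently from an absolute month index via divmod; Pre_ restricts to the natural domain start_month in 1..12 (or months < 1, where both return []), because an out-of-range start_month is malformed input on which A emits non-date strings like '2020-13-15' while B's divmod arithmetic normalizes it.
-- outside the precondition, e.g. on _monthly_dates(1, 2020, 13): A returns ['2020-13-15'], B returns ['2021-01-15']; on _monthly_dates(2, 2020, 0): A returns ['2020-00-15', '2020-01-15'], B returns ['2019-12-15', '2020-01-15']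
import Mathlib
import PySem

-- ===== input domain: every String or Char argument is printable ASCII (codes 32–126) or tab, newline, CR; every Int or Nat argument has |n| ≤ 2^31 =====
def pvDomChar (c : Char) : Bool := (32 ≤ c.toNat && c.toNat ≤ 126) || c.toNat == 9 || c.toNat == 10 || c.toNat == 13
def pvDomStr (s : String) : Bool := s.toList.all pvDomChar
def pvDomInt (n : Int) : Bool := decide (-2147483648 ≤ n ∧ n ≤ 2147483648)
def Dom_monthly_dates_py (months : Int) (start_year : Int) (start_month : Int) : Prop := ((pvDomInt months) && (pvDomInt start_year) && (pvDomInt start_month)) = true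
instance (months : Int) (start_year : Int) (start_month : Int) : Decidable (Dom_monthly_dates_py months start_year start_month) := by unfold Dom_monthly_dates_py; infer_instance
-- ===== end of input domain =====

-- B replaces A's stateful carry loop over a mutating (year, month) pair by one pass that
-- computes each date independently from an absolute month index via divmod (objective:
-- simpler; same linear cost); Pre_ restricts to the natural domain start_month ∈ 1..12.

-- shared helper: the f-string f"{y}-{m:02d}-15" both Pythons contain, exact for every int
-- (zero-padding to width 2 only affects 0 ≤ m ≤ 9; a sign counts toward the width).
def pvFmtDate (y m : Int) : String :=
  PySem.Int.toStr y ++ "-" ++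
    (if 0 ≤ m ∧ m ≤ 9 then "0" ++ PySem.Int.toStr m else PySem.Int.toStr m) ++ "-15"

-- ===== PORT A =====
def monthly_dates_py (months : Int) (start_year : Int) (start_month : Int) : List String :=
  -- dates = []; y, m = start_year, start_month; for _ in range(months): append; m += 1; carry
  ((PySem.List.pyRange 0 months 1).foldl
    (fun (st : List String × Int × Int) _ =>
      if st.2.2 + 1 > 12 then (st.1 ++ [pvFmtDate st.2.1 st.2.2], st.2.1 + 1, 1)
      else (st.1 ++ [pvFmtDate st.2.1 st.2.2], st.2.1, st.2.2 + 1))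
    ([], start_year, start_month)).1

-- ===== PORT B =====
def monthly_dates_py_alt (months : Int) (start_year : Int) (start_month : Int) : List String :=
  -- first = start_year*12 + start_month - 1; for i in range(months): y, m = divmod(first+i, 12)
  let first := start_year * 12 + start_month - 1
  (PySem.List.pyRange 0 months 1).map
    (fun i => pvFmtDate (PySem.Int.floordiv (first + i) 12) (PySem.Int.mod (first + i) 12 + 1))

-- ===== PRECONDITION & SPEC =====
-- Pre_ excludes malformed input: a start_month outside 1..12 (with months ≥ 1), on which
-- A emits non-date strings such as "2020-13-15" while B's divmod arithmetic normalizes the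
-- month; for months < 1 both return [] regardless of start_month, so those stay inside.
def Pre_monthly_dates_py (months : Int) (start_year : Int) (start_month : Int) : Prop :=
  months < 1 ∨ (1 ≤ start_month ∧ start_month ≤ 12)
instance (months : Int) (start_year : Int) (start_month : Int) : Decidable (Pre_monthly_dates_py months start_year start_month) := by unfold Pre_monthly_dates_py; infer_instance

def pvWitness_monthly_dates_py : Int × Int × Int := (3, 2020, 11)

def Spec_monthly_dates_py (months : Int) (start_year : Int) (start_month : Int) (out : List String) : Prop := out = monthly_dates_py_alt months start_year start_month
instance (months : Int) (start_year : Int) (start_month : Int) (out : List String) : Decidable (Spec_monthly_dates_py months start_year start_month out) := by unfold Spec_monthly_dates_py; infer_instance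

-- ===== CLAIM (what is proved, stated in full; the proofs are below) =====
def Claim_equal_monthly_dates_py : Prop := ∀ (months : Int) (start_year : Int) (start_month : Int), Dom_monthly_dates_py months start_year start_month → Pre_monthly_dates_py months start_year start_month → Spec_monthly_dates_py months start_year start_month (monthly_dates_py months start_year start_month)

-- ===== LEMMAS AND PROOFS =====

-- the (year, month) trajectory of A's loop, as pairs
def pvGen : Nat → Int → Int → List (Int × Int)
  | 0, _, _ => []
  | n + 1, y, m => (y, m) :: (if m + 1 > 12 then pvGen n (y + 1) 1 else pvGen n y (m + 1))

-- A's fold produces exactly the formatted trajectory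
lemma pvFoldA (l : List Int) : ∀ (acc : List String) (y m : Int),
    (l.foldl
      (fun (st : List String × Int × Int) _ =>
        if st.2.2 + 1 > 12 then (st.1 ++ [pvFmtDate st.2.1 st.2.2], st.2.1 + 1, 1)
        else (st.1 ++ [pvFmtDate st.2.1 st.2.2], st.2.1, st.2.2 + 1))
      (acc, y, m)).1
    = acc ++ (pvGen l.length y m).map (fun p => pvFmtDate p.1 p.2) := by
  induction l with
  | nil => intro acc y m; simp [pvGen]
  | cons a l ih =>
      intro acc y m
      simp only [List.foldl_cons, List.length_cons, pvGen]
      by_cases h : m + 1 > 12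
      · rw [if_pos h, if_pos h, ih, List.map_cons, List.append_assoc, List.singleton_append]
      · rw [if_neg h, if_neg h, ih, List.map_cons, List.append_assoc, List.singleton_append]

-- for a start month in 1..12, A's trajectory is the divmod closed form
lemma pvMain (n : Nat) : ∀ (y m : Int), 1 ≤ m → m ≤ 12 →
    pvGen n y m
    = (List.range n).map
        (fun (i : Nat) => (((y * 12 + m - 1 + i) / 12, (y * 12 + m - 1 + i) % 12 + 1) : Int × Int)) := by
  induction n with
  | zero => intro y m _ _; simp [pvGen]
  | succ n ih =>
      intro y m h1 h2
      rw [List.range_succ_eq_map, List.map_cons, List.map_map, pvGen]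
      have c0 : ((y * 12 + m - 1 + (0 : Nat)) / 12 : Int) = y := by omega
      have c1 : ((y * 12 + m - 1 + (0 : Nat)) % 12 + 1 : Int) = m := by omega
      rw [c0, c1]
      by_cases h : m + 1 > 12
      · have hm : m = 12 := by omega
        rw [if_pos h, ih (y + 1) 1 (by omega) (by omega)]
        congr 1
        apply List.map_congr_left
        intro i _
        subst hm
        have e1 : ((y + 1) * 12 + 1 - 1 + (i : Int)) = y * 12 + 12 - 1 + ((i : Int) + 1) := by ring
        simp only [Function.comp_apply, Nat.succ_eq_add_one, e1]
        push_cast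
        ring_nf
      · rw [if_neg h, ih y (m + 1) (by omega) (by omega)]
        congr 1
        apply List.map_congr_left
        intro i _
        have e1 : (y * 12 + (m + 1) - 1 + (i : Int)) = y * 12 + m - 1 + ((i : Int) + 1) := by ring
        simp only [Function.comp_apply, Nat.succ_eq_add_one, e1]
        push_cast
        ring_nf

-- ===== VERDICT (by name: the statement is the Claim_ definition above) =====
theorem monthly_dates_py_spec : Claim_equal_monthly_dates_py := by
  intro months start_year start_month _ hpre
  show monthly_dates_py months start_year start_month
      = monthly_dates_py_alt months start_year start_month
  unfold monthly_dates_py monthly_dates_py_alt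
  rw [pvFoldA, PySem.List.length_pyRange_one, Int.sub_zero, List.nil_append,
    PySem.List.pyRange_one, List.map_map, Int.sub_zero]
  by_cases hn : months ≤ 0
  · have h0 : months.toNat = 0 := by omega
    rw [h0]; simp [pvGen]
  · have hm : 1 ≤ start_month ∧ start_month ≤ 12 := by
      unfold Pre_monthly_dates_py at hpre; omega
    rw [pvMain months.toNat start_year start_month hm.1 hm.2, List.map_map]
    apply List.map_congr_left
    intro i _
    simp only [Function.comp_apply, zero_add]
    rw [PySem.Int.floordiv_eq_ediv_of_pos (by omega), PySem.Int.mod_eq_emod_of_pos (by omega)]
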